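-- pv_equiv track=rewrite | github.com/AshishLekhyani/GitScope | services/ai-engine/analysis/code_metrics.py | _find_python_func_end
-- ===== SOURCE A (Python) =====
-- def _find_python_func_end(
--     lines: list[str], start: int, upper_bound: int
-- ) -> int:
--     """
--     For Python: find the last line that is indented more than the
--     function definition line, within *upper_bound*.
--     """
--     if start >= len(lines):
--         return start + 1
--     def_indent = len(lines[start]) - len(lines[start].lstrip())
--     end = start
--     for i in range(start + 1, min(upper_bound, len(lines))):
--         stripped = lines[i].strip()
--         if not stripped:
--             continue
--         current_indent = len(lines[i]) - len(lines[i].lstrip())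
--         if current_indent > def_indent:
--             end = i
--         else:
--             break
--     return end + 1
-- ===== SOURCE B (Python) =====
-- def _find_python_func_end(
--     lines: list[str], start: int, upper_bound: int
-- ) -> int:
--     n = len(lines)
--     if start >= n:
--         return start + 1
--     def_indent = len(lines[start]) - len(lines[start].lstrip())
--     limit = min(upper_bound, n)
--     # Pass 1 (forward): find the boundary — first non-blank line at indent <= def_indent.
--     boundary = limit
--     for i in range(start + 1, limit):
--         if lines[i].strip() and len(lines[i]) - len(lines[i].lstrip()) <= def_indent:
--             boundary = i
--             break
--     # Pass 2 (backward): last non-blank line of the body, or start if none.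
--     end = start
--     for i in range(boundary - 1, start, -1):
--         if lines[i].strip():
--             end = i
--             break
--     return end + 1
-- ===== Notes on version B (the rewrite author's own statement) =====
-- stated objective: alternative
-- what changed: Replaces A's single fused loop that tracks the running 'end' while deciding break/continue with two separate simpler passes: a forward scan that only finds the block boundary (first non-blank line at indent <= def_indent), then a backward scan from that boundary that finds the last non-blank body line.
-- outside the precondition, e.g. on _find_python_func_end(['x'], -2, 1): A raises IndexError, B raises IndexError
import Mathlib
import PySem

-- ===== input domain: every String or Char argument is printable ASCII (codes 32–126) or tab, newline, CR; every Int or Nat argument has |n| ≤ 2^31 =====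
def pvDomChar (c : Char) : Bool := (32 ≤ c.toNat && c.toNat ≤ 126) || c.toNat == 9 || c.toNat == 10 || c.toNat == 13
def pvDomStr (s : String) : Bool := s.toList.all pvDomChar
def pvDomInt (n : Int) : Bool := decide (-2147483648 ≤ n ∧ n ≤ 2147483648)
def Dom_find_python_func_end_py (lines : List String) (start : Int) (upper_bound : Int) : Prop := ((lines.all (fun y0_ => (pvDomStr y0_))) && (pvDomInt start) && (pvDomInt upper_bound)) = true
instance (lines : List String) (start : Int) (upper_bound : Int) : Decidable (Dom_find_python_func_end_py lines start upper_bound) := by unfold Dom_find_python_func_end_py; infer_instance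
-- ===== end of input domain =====

-- B replaces A's single fused end-tracking loop by two simpler passes (forward boundary
-- search, then backward last-non-blank search); objective: alternative decomposition.

-- indentation of a line: len(s) - len(s.lstrip())  (shared helper, used by both ports)
def pvIndent (s : String) : Int := PySem.Str.len s - PySem.Str.len (PySem.Str.lstrip s)

-- ===== PORT A =====
-- A's for-loop with `continue`/`break`, over the precomputed range list, state = `end`
def pvLoopA (lines : List String) (d : Int) : Int → List Int → Int
  | acc, [] => acc
  | acc, i :: rest =>
      let s := PySem.List.pyGetD lines i ""
      if PySem.Str.strip s = "" then pvLoopA lines d acc rest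
      else if d < pvIndent s then pvLoopA lines d i rest
      else acc

def find_python_func_end_py (lines : List String) (start : Int) (upper_bound : Int) : Int :=
  if PySem.List.len lines ≤ start then start + 1
  else
    let d := pvIndent (PySem.List.pyGetD lines start "")
    let e := pvLoopA lines d start
      (PySem.List.pyRange (start + 1) (min upper_bound (PySem.List.len lines)) 1)
    e + 1

-- ===== PORT B =====
-- pass 1: first index whose line is non-blank with indent ≤ d, else `limit` (break = return)
def pvLoopFwd (lines : List String) (d : Int) (limit : Int) : List Int → Int
  | [] => limit
  | i :: rest =>
      let s := PySem.List.pyGetD lines i ""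
      if PySem.Str.strip s ≠ "" ∧ pvIndent s ≤ d then i else pvLoopFwd lines d limit rest

-- pass 2: first index (walking backward) whose line is non-blank, else `start`
def pvLoopBwd (lines : List String) (start : Int) : List Int → Int
  | [] => start
  | i :: rest =>
      if PySem.Str.strip (PySem.List.pyGetD lines i "") ≠ "" then i
      else pvLoopBwd lines start rest

def find_python_func_end_py_alt (lines : List String) (start : Int) (upper_bound : Int) : Int :=
  let n := PySem.List.len lines
  if n ≤ start then start + 1
  else
    let d := pvIndent (PySem.List.pyGetD lines start "")
    let limit := min upper_bound n
    let boundary := pvLoopFwd lines d limit (PySem.List.pyRange (start + 1) limit 1)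
    let e := pvLoopBwd lines start (PySem.List.pyRange (boundary - 1) start (-1))
    e + 1

-- ===== PRECONDITION & SPEC =====
-- Pre_ excludes exactly the inputs where A raises IndexError: start < -len(lines) (and
-- start < len(lines), so the early return is not taken); B raises there too.
def Pre_find_python_func_end_py (lines : List String) (start : Int) (upper_bound : Int) : Prop :=
  PySem.Raise.InRange lines.length start ∨ PySem.List.len lines ≤ start

instance (lines : List String) (start : Int) (upper_bound : Int) : Decidable (Pre_find_python_func_end_py lines start upper_bound) := by unfold Pre_find_python_func_end_py; infer_instance

def pvWitness_find_python_func_end_py : List String × Int × Int :=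
  (["def f():", "  x = 1", "", "  y = 2", "z"], 0, 10)

def Spec_find_python_func_end_py (lines : List String) (start : Int) (upper_bound : Int) (out : Int) : Prop := out = find_python_func_end_py_alt lines start upper_bound
instance (lines : List String) (start : Int) (upper_bound : Int) (out : Int) : Decidable (Spec_find_python_func_end_py lines start upper_bound out) := by unfold Spec_find_python_func_end_py; infer_instance

-- ===== CLAIM (what is proved, stated in full; the proofs are below) =====
def Claim_equal_find_python_func_end_py : Prop := ∀ (lines : List String) (start : Int) (upper_bound : Int), Dom_find_python_func_end_py lines start upper_bound → Pre_find_python_func_end_py lines start upper_bound → Spec_find_python_func_end_py lines start upper_bound (find_python_func_end_py lines start upper_bound)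

-- ===== LEMMAS AND PROOFS =====

-- a line index i is a "stopper": non-blank with indent ≤ d; A breaks there, B's pass 1 stops there
def pvStop (lines : List String) (d : Int) (i : Int) : Bool :=
  PySem.Str.strip (PySem.List.pyGetD lines i "") ≠ "" ∧ pvIndent (PySem.List.pyGetD lines i "") ≤ d

-- accumulator step of the "last non-blank line" computation
def pvStep (lines : List String) (acc i : Int) : Int :=
  if PySem.Str.strip (PySem.List.pyGetD lines i "") ≠ "" then i else acc

-- A's loop = "last non-blank index in the pre-break prefix, else the initial acc"
theorem pvLoopA_eq_foldl (lines : List String) (d : Int) (acc : Int) (R : List Int) :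
    pvLoopA lines d acc R = (R.takeWhile (fun i => ! pvStop lines d i)).foldl (pvStep lines) acc := by
  induction R generalizing acc with
  | nil => rfl
  | cons i rest ih =>
      simp only [pvLoopA, List.takeWhile_cons]
      by_cases hb : PySem.Str.strip (PySem.List.pyGetD lines i "") = ""
      · have hst : (! pvStop lines d i) = true := by simp [pvStop, hb]
        simp only [if_pos hb, hst, if_true, List.foldl_cons, ih]
        congr 1
        simp [pvStep, hb]
      · by_cases hd2 : d < pvIndent (PySem.List.pyGetD lines i "")
        · have hst : (! pvStop lines d i) = true := by simp [pvStop, hb]; omega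
          simp only [if_neg hb, if_pos hd2, hst, if_true, List.foldl_cons, ih]
          congr 1
          simp [pvStep, hb]
        · have hst : (! pvStop lines d i) = false := by simp [pvStop, hb]; omega
          simp only [if_neg hb, if_neg hd2, hst, Bool.false_eq_true, if_false, List.foldl_nil]

-- B's backward pass = the same foldl on the reversed list
theorem pvLoopBwd_eq_foldl (lines : List String) (start : Int) (L : List Int) :
    pvLoopBwd lines start L = L.reverse.foldl (pvStep lines) start := by
  induction L with
  | nil => rfl
  | cons i rest ih =>
      simp only [pvLoopBwd, List.reverse_cons, List.foldl_append, List.foldl_cons, List.foldl_nil, ih]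
      by_cases hb : PySem.Str.strip (PySem.List.pyGetD lines i "") = ""
      · simp [pvStep, hb]
      · simp [pvStep, hb]

-- B's forward pass on a contiguous range returns start-of-range + length of the no-stopper prefix
theorem pvLoopFwd_range (lines : List String) (d limit : Int) (k : Nat) (a : Int)
    (hk : a + k = limit) :
    pvLoopFwd lines d limit (PySem.List.pyRange a limit 1)
      = a + ((PySem.List.pyRange a limit 1).takeWhile (fun i => ! pvStop lines d i)).length := by
  induction k generalizing a with
  | zero =>
      rw [PySem.List.pyRange_one_eq_nil (by omega)]
      simp [pvLoopFwd]; omega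
  | succ m ih =>
      rw [PySem.List.pyRange_one_cons (by omega)]
      simp only [pvLoopFwd, List.takeWhile_cons]
      by_cases hs : pvStop lines d a = true
      · have h1 : PySem.Str.strip (PySem.List.pyGetD lines a "") ≠ "" ∧
            pvIndent (PySem.List.pyGetD lines a "") ≤ d := by
          simpa [pvStop] using hs
        simp [h1.1, h1.2, hs]
      · have h1 : ¬ (PySem.Str.strip (PySem.List.pyGetD lines a "") ≠ "" ∧
            pvIndent (PySem.List.pyGetD lines a "") ≤ d) := by
          simpa [pvStop] using hs
        simp only [h1, if_false, hs, Bool.not_false, if_true]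
        rw [ih (a + 1) (by omega)]
        simp only [List.length_cons]
        omega

-- countdown range = reverse of the shifted count-up range
theorem pvRange_countdown (k : Nat) (a : Int) :
    PySem.List.pyRange (a + k) a (-1) = (PySem.List.pyRange (a + 1) (a + 1 + k) 1).reverse := by
  induction k with
  | zero =>
      rw [PySem.List.pyRange_neg_one_eq_nil (by omega), PySem.List.pyRange_one_eq_nil (by omega)]
      rfl
  | succ m ih =>
      push_cast
      rw [PySem.List.pyRange_neg_one_cons (by omega),
        show a + ((m : Int) + 1) - 1 = a + (m : Int) by ring,
        show a + 1 + ((m : Int) + 1) = (a + 1 + (m : Int)) + 1 by ring,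
        PySem.List.pyRange_one_succ_right (by omega),
        List.reverse_append, ih,
        show a + ((m : Int) + 1) = a + 1 + (m : Int) by ring]
      rfl

-- the no-stopper prefix of the scanned range is itself a contiguous range
theorem pvTakeWhile_range (lines : List String) (d : Int) (k : Nat) :
    ∀ (a b : Int), (b - a).toNat = k →
    (PySem.List.pyRange a b 1).takeWhile (fun i => ! pvStop lines d i)
      = PySem.List.pyRange a (a + ((PySem.List.pyRange a b 1).takeWhile (fun i => ! pvStop lines d i)).length) 1 := by
  induction k with
  | zero =>
      intro a b hk
      rw [PySem.List.pyRange_one_eq_nil (by omega)]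
      simp [PySem.List.pyRange_one_eq_nil (le_refl a)]
  | succ m ih =>
      intro a b hk
      rw [PySem.List.pyRange_one_cons (by omega)]
      by_cases hs : pvStop lines d a = true
      · rw [List.takeWhile_cons_of_neg (by simp [hs])]
        simp [PySem.List.pyRange_one_eq_nil (le_refl a)]
      · rw [List.takeWhile_cons_of_pos (by simp [hs])]
        have hT := ih (a + 1) b (by omega)
        set T := (PySem.List.pyRange (a + 1) b 1).takeWhile (fun i => ! pvStop lines d i) with hTdef
        simp only [List.length_cons]
        rw [PySem.List.pyRange_one_cons (by push_cast; omega),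
          show a + ((T.length + 1 : Nat) : Int) = a + 1 + (T.length : Int) by push_cast; ring,
          ← hT]

-- ===== VERDICT (by name: the statement is the Claim_ definition above) =====
theorem find_python_func_end_py_spec : Claim_equal_find_python_func_end_py := by
  intro lines start upper_bound _hDom _hPre
  unfold Spec_find_python_func_end_py find_python_func_end_py find_python_func_end_py_alt
  simp only [PySem.List.len_eq]
  by_cases hs : (lines.length : Int) ≤ start
  · rw [if_pos hs, if_pos hs]
  · rw [if_neg hs, if_neg hs]
    set d := pvIndent (PySem.List.pyGetD lines start "") with hd
    set limit := min upper_bound (lines.length : Int) with hlimit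
    set R := PySem.List.pyRange (start + 1) limit 1 with hR
    set P := R.takeWhile (fun i => ! pvStop lines d i) with hP
    rw [pvLoopA_eq_foldl]
    by_cases hsmall : limit ≤ start + 1
    · have hRnil : R = [] := PySem.List.pyRange_one_eq_nil hsmall
      have hfwd : pvLoopFwd lines d limit R = limit := by rw [hRnil]; rfl
      rw [hfwd, hRnil]
      rw [PySem.List.pyRange_neg_one_eq_nil (by omega)]
      simp [pvLoopBwd]
    · have hk : start + 1 + ((limit - (start + 1)).toNat : Int) = limit := by omega
      rw [pvLoopFwd_range lines d limit (limit - (start + 1)).toNat (start + 1) hk]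
      rw [← hR, ← hP]
      have hPr : P = PySem.List.pyRange (start + 1) (start + 1 + (P.length : Int)) 1 := by
        rw [hP, hR]
        exact pvTakeWhile_range lines d (limit - (start + 1)).toNat (start + 1) limit (rfl)
      rw [show start + 1 + (P.length : Int) - 1 = start + (P.length : Int) by ring,
        pvRange_countdown P.length start, pvLoopBwd_eq_foldl, List.reverse_reverse, ← hPr]
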